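-- pv_equiv track=rewrite | github.com/neddul/advent-of-code | 2025/07/laboratories.py | count_paths_to_start
-- ===== SOURCE A (Python) =====
-- def count_paths_to_start(graph, current, start, memo=None, visited=None):
--     # Set up memo and visited on first call
--     if memo is None:
--         memo = {}
--     if visited is None:
--         visited = set()
--
--     # If we've reached the starting coordinate, we've found 1 path
--     if current == start:
--         return 1
--
--     # If we already computed from this node, reuse it
--     if current in memo:
--         return memo[current]
--
--     # Cycle protection: if we're revisiting a node in the same path, stop
--     if current in visited:
--         return 0
--
--     visited.add(current)
--
--     total = 0
--     # Get neighbors; if current not in graph, treat as dead end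
--     for nxt in graph.get(current, []):
--         total += count_paths_to_start(graph, nxt, start, memo, visited)
--
--     visited.remove(current)
--
--     memo[current] = total
--     return total
-- ===== SOURCE B (Python) =====
-- def count_paths_to_start(graph, current, start, memo=None, visited=None):
--     # Iterative DFS with an explicit stack of frames instead of recursion.
--     if memo is None:
--         memo = {}
--     if visited is None:
--         visited = set()
--     stack = []           # frames: [node, remaining neighbors, partial total]
--     ret = None           # value being handed back to the frame below
--     node = current       # node to enter next (meaningful only when ret is None)
--     while True:
--         if ret is None:
--             # enter `node`: same guards, in the same order as the recursion
--             if node == start: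
--                 ret = 1
--             elif node in memo:
--                 ret = memo[node]
--             elif node in visited:
--                 ret = 0
--             else:
--                 visited.add(node)
--                 stack.append([node, list(graph.get(node, [])), 0])
--                 ret = 0   # hand 0 to the fresh frame and start on its neighbors
--         else:
--             if not stack:
--                 return ret
--             frame = stack[-1]
--             frame[2] += ret
--             if frame[1]:
--                 node = frame[1].pop(0)
--                 ret = None
--             else:
--                 stack.pop()
--                 visited.remove(frame[0])
--                 memo[frame[0]] = frame[2]
--                 ret = frame[2]
-- ===== Notes on version B (the rewrite author's own statement) =====
-- stated objective: alternative
-- what changed: The recursive memoized DFS is re-decomposed as an iterative DFS: a single while-loop drives an explicit stack of frames (node, remaining neighbors, partial total) with the same guard order (start, memo, visited), the same shared memo/visited discipline and the same visit order, so the recursion disappears entirely.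
import Mathlib
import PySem

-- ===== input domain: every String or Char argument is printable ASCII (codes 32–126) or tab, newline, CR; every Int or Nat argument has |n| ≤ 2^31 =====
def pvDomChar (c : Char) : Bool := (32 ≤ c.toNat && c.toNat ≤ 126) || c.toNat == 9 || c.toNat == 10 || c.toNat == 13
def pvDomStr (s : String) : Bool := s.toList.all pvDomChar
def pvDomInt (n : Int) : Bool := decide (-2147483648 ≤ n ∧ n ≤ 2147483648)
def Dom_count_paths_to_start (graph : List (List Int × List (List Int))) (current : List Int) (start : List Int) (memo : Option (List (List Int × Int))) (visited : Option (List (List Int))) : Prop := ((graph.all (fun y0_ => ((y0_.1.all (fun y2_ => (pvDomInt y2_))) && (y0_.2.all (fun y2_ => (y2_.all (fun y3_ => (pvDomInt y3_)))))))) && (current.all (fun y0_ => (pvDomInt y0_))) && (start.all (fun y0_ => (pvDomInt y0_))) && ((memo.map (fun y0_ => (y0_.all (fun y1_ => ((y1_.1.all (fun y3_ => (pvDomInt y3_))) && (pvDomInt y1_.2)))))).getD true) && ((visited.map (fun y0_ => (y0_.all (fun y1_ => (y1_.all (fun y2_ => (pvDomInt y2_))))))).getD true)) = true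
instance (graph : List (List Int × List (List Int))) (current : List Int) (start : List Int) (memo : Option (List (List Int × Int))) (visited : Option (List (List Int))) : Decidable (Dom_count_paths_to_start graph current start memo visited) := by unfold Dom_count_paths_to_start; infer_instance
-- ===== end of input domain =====

-- B re-implements A's recursive memoized DFS as an iterative DFS with an explicit stack of frames
-- (same guards, same visit order, same memo/visited discipline); objective: alternative decomposition,
-- equal return value on every input. (Both A and B mutate the caller's memo, and add/remove on visited,
-- identically; the theorem below is about the return value.)

-- fuel bound shared by both ports' totality devices: number of graph keys not yet visited
def cptsKeysLeft (g : PySem.Dict (List Int) (List (List Int))) (v : PySem.Set (List Int)) : Nat :=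
  (g.keys.filter (fun k => !(PySem.Set.contains v k))).length

-- ===== PORT A =====
-- literal transliteration of A's recursion; `fuel` is only a totality device (it decreases once per
-- node entry and `cptsGo_isSome` below proves the chosen bound is never exhausted)
mutual
def cptsGo (g : PySem.Dict (List Int) (List (List Int))) (s : List Int) (fuel : Nat)
    (memo : PySem.Dict (List Int) Int) (visited : PySem.Set (List Int)) (current : List Int) :
    Option (Int × PySem.Dict (List Int) Int × PySem.Set (List Int)) :=
  match fuel with
  | 0 => none
  | f + 1 =>
    if current = s then some (1, memo, visited)                      -- if current == start: return 1
    else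
      match memo.get? current with                                   -- if current in memo: return memo[current]
      | some v => some (v, memo, visited)
      | none =>
        if PySem.Set.contains visited current then some (0, memo, visited)   -- if current in visited: return 0
        else
          match cptsGoList g s f (g.getD current []) 0 memo (PySem.Set.add visited current) with
          | none => none
          | some (total, m2, v2) =>
            match PySem.Set.remove? v2 current with                  -- visited.remove(current)
            | none => none
            | some v3 => some (total, m2.insert current total, v3)   -- memo[current] = total; return total

def cptsGoList (g : PySem.Dict (List Int) (List (List Int))) (s : List Int) (fuel : Nat)
    (ns : List (List Int)) (total : Int)
    (memo : PySem.Dict (List Int) Int) (visited : PySem.Set (List Int)) :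
    Option (Int × PySem.Dict (List Int) Int × PySem.Set (List Int)) :=
  match ns with
  | [] => some (total, memo, visited)
  | n :: rest =>                                                     -- for nxt in graph.get(current, []):
    match cptsGo g s fuel memo visited n with
    | none => none
    | some (w, m', v') => cptsGoList g s fuel rest (total + w) m' v'  -- total += count_paths_to_start(...)
end

def count_paths_to_start (graph : List (List Int × List (List Int))) (current : List Int) (start : List Int) (memo : Option (List (List Int × Int))) (visited : Option (List (List Int))) : Int :=
  match cptsGo (PySem.Dict.mk graph) start
      (cptsKeysLeft (PySem.Dict.mk graph) (visited.getD []) + 1)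
      (PySem.Dict.mk (memo.getD [])) (visited.getD []) current with
  | some (t, _, _) => t
  | none => 0

-- ===== PORT B =====
-- largest neighbor-list length in the graph (used only in B's fuel bound)
def cptsMaxDeg (g : PySem.Dict (List Int) (List (List Int))) : Nat :=
  g.values.foldl (fun a ns => max a ns.length) 0

-- literal transliteration of Source B's while-loop: one function per state of `ret`
-- (cptsRunE = iteration with ret None entering `node`; cptsRunP = iteration with ret = some r);
-- each loop iteration consumes one unit of fuel, a totality device only
mutual
def cptsRunE (g : PySem.Dict (List Int) (List (List Int))) (s : List Int) (fuel : Nat)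
    (node : List Int) (stack : List (List Int × List (List Int) × Int))
    (memo : PySem.Dict (List Int) Int) (visited : PySem.Set (List Int)) : Option Int :=
  match fuel with
  | 0 => none
  | f + 1 =>
    if node = s then cptsRunP g s f 1 stack memo visited
    else
      match memo.get? node with
      | some v => cptsRunP g s f v stack memo visited
      | none =>
        if PySem.Set.contains visited node then cptsRunP g s f 0 stack memo visited
        else cptsRunP g s f 0 ((node, g.getD node [], 0) :: stack) memo (PySem.Set.add visited node)

def cptsRunP (g : PySem.Dict (List Int) (List (List Int))) (s : List Int) (fuel : Nat)
    (r : Int) (stack : List (List Int × List (List Int) × Int))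
    (memo : PySem.Dict (List Int) Int) (visited : PySem.Set (List Int)) : Option Int :=
  match fuel with
  | 0 => none
  | f + 1 =>
    match stack with
    | [] => some r
    | (c, n :: ns, t) :: rest => cptsRunE g s f n ((c, ns, t + r) :: rest) memo visited
    | (c, [], t) :: rest =>
      match PySem.Set.remove? visited c with                          -- visited.remove(frame[0])
      | none => none
      | some v' => cptsRunP g s f (t + r) rest (memo.insert c (t + r)) v'
end

def count_paths_to_start_alt (graph : List (List Int × List (List Int))) (current : List Int) (start : List Int) (memo : Option (List (List Int × Int))) (visited : Option (List (List Int))) : Int :=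
  match cptsRunE (PySem.Dict.mk graph) start
      ((cptsMaxDeg (PySem.Dict.mk graph) + 3) ^ (cptsKeysLeft (PySem.Dict.mk graph) (visited.getD []) + 1) + 1)
      current [] (PySem.Dict.mk (memo.getD [])) (visited.getD []) with
  | some t => t
  | none => 0

-- ===== PRECONDITION & SPEC =====
def Spec_count_paths_to_start (graph : List (List Int × List (List Int))) (current : List Int) (start : List Int) (memo : Option (List (List Int × Int))) (visited : Option (List (List Int))) (out : Int) : Prop := out = count_paths_to_start_alt graph current start memo visited
instance (graph : List (List Int × List (List Int))) (current : List Int) (start : List Int) (memo : Option (List (List Int × Int))) (visited : Option (List (List Int))) (out : Int) : Decidable (Spec_count_paths_to_start graph current start memo visited out) := by unfold Spec_count_paths_to_start; infer_instance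

-- ===== CLAIM (what is proved, stated in full; the proofs are below) =====
def Claim_equal_count_paths_to_start : Prop := ∀ (graph : List (List Int × List (List Int))) (current : List Int) (start : List Int) (memo : Option (List (List Int × Int))) (visited : Option (List (List Int))), Dom_count_paths_to_start graph current start memo visited → Spec_count_paths_to_start graph current start memo visited (count_paths_to_start graph current start memo visited)

-- ===== LEMMAS AND PROOFS =====

theorem cpts_bnot_contains (s : PySem.Set (List Int)) (x : List Int) :
    (!(PySem.Set.contains s x)) = true ↔ x ∉ s := by
  rw [Bool.not_eq_true']
  constructor
  · intro h hx
    rw [(PySem.Set.contains_iff s x).mpr hx] at h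
    exact Bool.noConfusion h
  · intro h
    cases hb : PySem.Set.contains s x with
    | false => rfl
    | true => exact absurd ((PySem.Set.contains_iff s x).mp hb) h

theorem cpts_filter_le (c : List Int) (v : List (List Int)) :
    ∀ keys : List (List Int),
      (keys.filter (fun k => !(PySem.Set.contains (v ++ [c]) k))).length ≤
      (keys.filter (fun k => !(PySem.Set.contains v k))).length := by
  intro keys
  induction keys with
  | nil => simp
  | cons k ks ih =>
    simp only [List.filter_cons]
    by_cases h1 : (!(PySem.Set.contains (v ++ [c]) k)) = true
    · have h2 : (!(PySem.Set.contains v k)) = true := by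
        rw [cpts_bnot_contains] at h1 ⊢
        exact fun hk => h1 (List.mem_append.mpr (Or.inl hk))
      rw [if_pos h1, if_pos h2]
      simp only [List.length_cons]
      exact Nat.succ_le_succ ih
    · rw [if_neg h1]
      by_cases h2 : (!(PySem.Set.contains v k)) = true
      · rw [if_pos h2]
        exact Nat.le_succ_of_le ih
      · rw [if_neg h2]; exact ih

theorem cpts_filter_lt (c : List Int) (v : List (List Int)) (hcv : c ∉ v) :
    ∀ keys : List (List Int), c ∈ keys →
      (keys.filter (fun k => !(PySem.Set.contains (v ++ [c]) k))).length <
      (keys.filter (fun k => !(PySem.Set.contains v k))).length := by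
  intro keys
  induction keys with
  | nil => intro h; simp at h
  | cons k ks ih =>
    intro hmem
    simp only [List.filter_cons]
    rcases List.mem_cons.mp hmem with rfl | hmem'
    · have hc1 : ¬((!(PySem.Set.contains (v ++ [c]) c)) = true) := by
        rw [cpts_bnot_contains]
        intro hk
        exact hk (List.mem_append.mpr (Or.inr (List.mem_singleton.mpr rfl)))
      have hc2 : (!(PySem.Set.contains v c)) = true := (cpts_bnot_contains v c).mpr hcv
      rw [if_neg hc1, if_pos hc2]
      simp only [List.length_cons]
      exact Nat.lt_succ_of_le (cpts_filter_le c v ks)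
    · by_cases h1 : (!(PySem.Set.contains (v ++ [c]) k)) = true
      · have h2 : (!(PySem.Set.contains v k)) = true := by
          rw [cpts_bnot_contains] at h1 ⊢
          exact fun hk => h1 (List.mem_append.mpr (Or.inl hk))
        rw [if_pos h1, if_pos h2]
        simp only [List.length_cons]
        exact Nat.succ_lt_succ (ih hmem')
      · rw [if_neg h1]
        by_cases h2 : (!(PySem.Set.contains v k)) = true
        · rw [if_pos h2]
          exact Nat.lt_succ_of_lt (ih hmem')
        · rw [if_neg h2]; exact ih hmem'

theorem cpts_keysLeft_lt (g : PySem.Dict (List Int) (List (List Int))) (v : PySem.Set (List Int))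
    (c : List Int) (hck : c ∈ PySem.Dict.keys g) (hcv : c ∉ v) :
    cptsKeysLeft g (PySem.Set.add v c) < cptsKeysLeft g v := by
  unfold cptsKeysLeft
  rw [PySem.Set.add_of_not_mem hcv]
  exact cpts_filter_lt c v hcv _ hck

theorem cpts_foldl_max_init : ∀ (l : List (List (List Int))) (a : Nat),
    a ≤ l.foldl (fun a ns => max a ns.length) a := by
  intro l
  induction l with
  | nil => intro a; exact le_refl a
  | cons x xs ih => intro a; exact le_trans (Nat.le_max_left a x.length) (ih _)

theorem cpts_foldl_max_mem : ∀ (l : List (List (List Int))) (a : Nat) (x : List (List Int)),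
    x ∈ l → x.length ≤ l.foldl (fun a ns => max a ns.length) a := by
  intro l
  induction l with
  | nil => intro a x h; simp at h
  | cons y ys ih =>
    intro a x h
    rcases List.mem_cons.mp h with rfl | h'
    · exact le_trans (Nat.le_max_right a x.length) (cpts_foldl_max_init ys _)
    · exact ih _ x h'

theorem cpts_len_le_maxDeg (g : PySem.Dict (List Int) (List (List Int))) (c : List Int)
    (ns : List (List Int)) (h : PySem.Dict.get? g c = some ns) : ns.length ≤ cptsMaxDeg g := by
  have hmem : (c, ns) ∈ g.items := PySem.Dict.mem_items_of_get?_eq_some g h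
  have hval : ns ∈ PySem.Dict.values g := by
    unfold PySem.Dict.values
    exact List.mem_map.mpr ⟨(c, ns), hmem, rfl⟩
  exact cpts_foldl_max_mem _ 0 _ hval

theorem cpts_discard_append (v : List (List Int)) (c : List Int) (h : c ∉ v) :
    PySem.Set.discard (v ++ [c]) c = v := by
  unfold PySem.Set.discard
  rw [List.filter_append]
  have h1 : List.filter (fun y => !y == c) [c] = [] := by simp
  have h2 : List.filter (fun y => !y == c) v = v := by
    rw [List.filter_eq_self]
    intro y hy
    simp only [Bool.not_eq_true', beq_eq_false_iff_ne]
    exact fun e => h (e ▸ hy)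
  rw [h1, h2, List.append_nil]

-- A's recursion hands `visited` back exactly as it received it (it adds `current` and removes it again)
theorem cptsGo_visited_eq (g : PySem.Dict (List Int) (List (List Int))) (s : List Int) :
    ∀ (f : Nat) (m : PySem.Dict (List Int) Int) (v : PySem.Set (List Int)) (c : List Int) r,
      cptsGo g s f m v c = some r → r.2.2 = v := by
  intro f
  induction f with
  | zero => intro m v c r h; simp [cptsGo] at h
  | succ f ih =>
    have hl : ∀ (ns : List (List Int)) (t : Int) m v r,
        cptsGoList g s f ns t m v = some r → r.2.2 = v := by
      intro ns
      induction ns with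
      | nil =>
        intro t m v r h
        simp only [cptsGoList, Option.some.injEq] at h
        rw [← h]
      | cons n rest ihns =>
        intro t m v r h
        simp only [cptsGoList] at h
        cases hgo : cptsGo g s f m v n with
        | none => simp only [hgo] at h; simp at h
        | some w =>
          obtain ⟨w1, m1, v1⟩ := w
          simp only [hgo] at h
          have h1 : v1 = v := ih m v n _ hgo
          subst h1
          exact ihns _ _ _ _ h
    intro m v c r h
    simp only [cptsGo] at h
    by_cases hcs : c = s
    · rw [if_pos hcs] at h
      injection h with h
      rw [← h]
    · rw [if_neg hcs] at h
      cases hm : PySem.Dict.get? m c with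
      | some w =>
        simp only [hm] at h
        injection h with h
        rw [← h]
      | none =>
        simp only [hm] at h
        by_cases hvc : PySem.Set.contains v c = true
        · rw [if_pos hvc] at h
          injection h with h
          rw [← h]
        · rw [if_neg hvc] at h
          have hcv : c ∉ v := fun hx => hvc ((PySem.Set.contains_iff v c).mpr hx)
          cases hgl : cptsGoList g s f (PySem.Dict.getD g c []) 0 m (PySem.Set.add v c) with
          | none => simp only [hgl] at h; simp at h
          | some w =>
            obtain ⟨tt, m2, v2⟩ := w
            simp only [hgl] at h
            have hv2 : v2 = PySem.Set.add v c := hl _ _ _ _ _ hgl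
            cases hrem : PySem.Set.remove? v2 c with
            | none => simp only [hrem] at h; simp at h
            | some v3 =>
              simp only [hrem] at h
              injection h with h
              rw [← h]
              have hmemc : c ∈ v2 := by
                rw [hv2]; exact (PySem.Set.mem_add v c c).mpr (Or.inr rfl)
              have hof := PySem.Set.remove?_of_mem hmemc
              rw [hof] at hrem
              injection hrem with hrem
              rw [← hrem, hv2, PySem.Set.add_of_not_mem hcv]
              exact cpts_discard_append v c hcv

theorem cptsGoList_visited_eq (g : PySem.Dict (List Int) (List (List Int))) (s : List Int) :
    ∀ (f : Nat) (ns : List (List Int)) (t : Int) (m : PySem.Dict (List Int) Int)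
      (v : PySem.Set (List Int)) r,
      cptsGoList g s f ns t m v = some r → r.2.2 = v := by
  intro f ns
  induction ns with
  | nil =>
    intro t m v r h
    simp only [cptsGoList, Option.some.injEq] at h
    rw [← h]
  | cons n rest ihns =>
    intro t m v r h
    simp only [cptsGoList] at h
    cases hgo : cptsGo g s f m v n with
    | none => simp only [hgo] at h; simp at h
    | some w =>
      obtain ⟨w1, m1, v1⟩ := w
      simp only [hgo] at h
      have h1 : v1 = v := cptsGo_visited_eq g s f m v n _ hgo
      subst h1
      exact ihns _ _ _ _ h

-- the fuel bound `cptsKeysLeft + 1` is never exhausted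
theorem cptsGo_isSome (g : PySem.Dict (List Int) (List (List Int))) (s : List Int) :
    ∀ (f : Nat) (v : PySem.Set (List Int)), cptsKeysLeft g v < f →
      ∀ (m : PySem.Dict (List Int) Int) (c : List Int), (cptsGo g s f m v c).isSome := by
  intro f
  induction f with
  | zero => intro v hv; exact absurd hv (Nat.not_lt_zero _)
  | succ f ih =>
    intro v hv m c
    simp only [cptsGo]
    by_cases hcs : c = s
    · rw [if_pos hcs]; rfl
    · rw [if_neg hcs]
      cases hm : PySem.Dict.get? m c with
      | some w => rfl
      | none =>
        by_cases hvc : PySem.Set.contains v c = true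
        · simp only [if_pos hvc]; rfl
        · simp only [if_neg hvc]
          have hcv : c ∉ v := fun hx => hvc ((PySem.Set.contains_iff v c).mpr hx)
          have hl : ∀ (ns : List (List Int)) (t : Int) m' v', cptsKeysLeft g v' < f →
              (cptsGoList g s f ns t m' v').isSome := by
            intro ns
            induction ns with
            | nil => intro t m' v' _; simp [cptsGoList]
            | cons n rest ihns =>
              intro t m' v' hv'
              simp only [cptsGoList]
              obtain ⟨r1, hgo⟩ := Option.isSome_iff_exists.mp (ih v' hv' m' n)
              obtain ⟨w, m1, v1⟩ := r1
              simp only [hgo]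
              have hveq : v1 = v' := cptsGo_visited_eq g s f m' v' n _ hgo
              subst hveq
              exact ihns (t + w) m1 v1 hv'
          cases hns : PySem.Dict.get? g c with
          | none =>
            have hgd : PySem.Dict.getD g c [] = [] := by
              rw [PySem.Dict.getD, hns]; rfl
            rw [hgd]
            have hrem := PySem.Set.remove?_of_mem ((PySem.Set.mem_add v c c).mpr (Or.inr rfl))
            simp [cptsGoList, hrem]
          | some ns =>
            have hck : c ∈ PySem.Dict.keys g := by
              by_contra hnk
              rw [(PySem.Dict.get?_eq_none_iff_not_mem_keys g c).mpr hnk] at hns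
              simp at hns
            have hlt := cpts_keysLeft_lt g v c hck hcv
            obtain ⟨r2, hgl⟩ := Option.isSome_iff_exists.mp
              (hl (PySem.Dict.getD g c []) 0 m (PySem.Set.add v c) (by omega))
            obtain ⟨tt, m2, v2⟩ := r2
            simp only [hgl]
            have hv2 : v2 = PySem.Set.add v c := cptsGoList_visited_eq g s f _ _ _ _ _ hgl
            have hmemc : c ∈ v2 := by
              rw [hv2]; exact (PySem.Set.mem_add v c c).mpr (Or.inr rfl)
            simp only [PySem.Set.remove?_of_mem hmemc]
            rfl

-- the machine is monotone in its fuel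
theorem cptsRun_mono (g : PySem.Dict (List Int) (List (List Int))) (s : List Int) :
    ∀ (f f' : Nat), f ≤ f' →
      (∀ node stack m v res, cptsRunE g s f node stack m v = some res →
        cptsRunE g s f' node stack m v = some res) ∧
      (∀ r stack m v res, cptsRunP g s f r stack m v = some res →
        cptsRunP g s f' r stack m v = some res) := by
  intro f
  induction f with
  | zero =>
    intro f' _
    constructor
    · intro node stack m v res h; simp [cptsRunE] at h
    · intro r stack m v res h; simp [cptsRunP] at h
  | succ f ih =>
    intro f' hle
    obtain ⟨f'', rfl⟩ : ∃ f'', f' = f'' + 1 := ⟨f' - 1, by omega⟩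
    have hle' : f ≤ f'' := by omega
    constructor
    · intro node stack m v res h
      simp only [cptsRunE] at h ⊢
      by_cases hns : node = s
      · rw [if_pos hns] at h ⊢
        exact (ih f'' hle').2 _ _ _ _ _ h
      · rw [if_neg hns] at h ⊢
        cases hm : PySem.Dict.get? m node with
        | some w =>
          simp only [hm] at h ⊢
          exact (ih f'' hle').2 _ _ _ _ _ h
        | none =>
          simp only [hm] at h ⊢
          by_cases hv : PySem.Set.contains v node = true
          · simp only [if_pos hv] at h ⊢
            exact (ih f'' hle').2 _ _ _ _ _ h
          · simp only [if_neg hv] at h ⊢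
            exact (ih f'' hle').2 _ _ _ _ _ h
    · intro r stack m v res h
      simp only [cptsRunP] at h ⊢
      cases stack with
      | nil => exact h
      | cons fr rest =>
        obtain ⟨c, ns, t⟩ := fr
        cases ns with
        | cons n ns' => exact (ih f'' hle').1 _ _ _ _ _ h
        | nil =>
          cases hrem : PySem.Set.remove? v c with
          | none => simp only [hrem] at h; simp at h
          | some v' =>
            simp only [hrem] at h ⊢
            exact (ih f'' hle').2 _ _ _ _ _ h

-- simulation: whatever A's recursion computes, the stack machine hands to the frame below
theorem cptsSim (g : PySem.Dict (List Int) (List (List Int))) (s : List Int) :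
    ∀ (f : Nat) (m : PySem.Dict (List Int) Int) (v : PySem.Set (List Int)) (c : List Int)
      (t : Int) (m' : PySem.Dict (List Int) Int) (v' : PySem.Set (List Int)),
      cptsGo g s f m v c = some (t, m', v') →
      ∀ stack fb res, cptsRunP g s fb t stack m' v' = some res →
        cptsRunE g s (fb + (cptsMaxDeg g + 3) ^ f) c stack m v = some res := by
  intro f
  induction f with
  | zero => intro m v c t m' v' h; simp [cptsGo] at h
  | succ f ih =>
    have hQ : ∀ (ns : List (List Int)) (acc : Int) m v tt m₂ v₂,
        cptsGoList g s f ns acc m v = some (tt, m₂, v₂) →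
        ∀ (c : List Int) v₃, PySem.Set.remove? v₂ c = some v₃ →
        ∀ rest (t0 r : Int) fb res, t0 + r = acc →
          cptsRunP g s fb tt rest (m₂.insert c tt) v₃ = some res →
          cptsRunP g s (fb + (1 + ns.length * ((cptsMaxDeg g + 3) ^ f + 1))) r
            ((c, ns, t0) :: rest) m v = some res := by
      intro ns
      induction ns with
      | nil =>
        intro acc m v tt m₂ v₂ h c v₃ hrem rest t0 r fb res hacc hP
        simp only [cptsGoList, Option.some.injEq, Prod.mk.injEq] at h
        obtain ⟨h1, h2, h3⟩ := h
        subst h1; subst h2; subst h3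
        simp only [List.length_nil, Nat.zero_mul, Nat.add_zero]
        simp only [cptsRunP, hrem]
        rw [hacc]
        exact hP
      | cons n rest' ihns =>
        intro acc m v tt m₂ v₂ h c v₃ hrem rest t0 r fb res hacc hP
        simp only [cptsGoList] at h
        cases hgo : cptsGo g s f m v n with
        | none => simp only [hgo] at h; simp at h
        | some w =>
          obtain ⟨w1, m1, v1⟩ := w
          simp only [hgo] at h
          have hF : fb + (1 + (n :: rest').length * ((cptsMaxDeg g + 3) ^ f + 1))
              = ((fb + (1 + rest'.length * ((cptsMaxDeg g + 3) ^ f + 1))) + (cptsMaxDeg g + 3) ^ f) + 1 := by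
            simp only [List.length_cons]
            ring
          rw [hF]
          simp only [cptsRunP]
          have hQr := ihns (acc + w1) m1 v1 tt m₂ v₂ h c v₃ hrem rest (t0 + r) w1 fb res
            (by rw [hacc]) hP
          exact ih m v n w1 m1 v1 hgo ((c, rest', t0 + r) :: rest)
            (fb + (1 + rest'.length * ((cptsMaxDeg g + 3) ^ f + 1))) res hQr
    intro m v c t m' v' h stack fb res hP
    have hpos : 1 ≤ (cptsMaxDeg g + 3) ^ (f + 1) := Nat.one_le_pow _ _ (by omega)
    obtain ⟨F, hFeq⟩ : ∃ F, fb + (cptsMaxDeg g + 3) ^ (f + 1) = F + 1 :=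
      ⟨fb + (cptsMaxDeg g + 3) ^ (f + 1) - 1, by omega⟩
    have hfb : fb ≤ F := by omega
    simp only [cptsGo] at h
    by_cases hcs : c = s
    · rw [if_pos hcs] at h
      simp only [Option.some.injEq, Prod.mk.injEq] at h
      obtain ⟨h1, h2, h3⟩ := h
      subst h1; subst h2; subst h3
      rw [hFeq]
      simp only [cptsRunE, if_pos hcs]
      exact (cptsRun_mono g s fb F hfb).2 _ _ _ _ _ hP
    · rw [if_neg hcs] at h
      cases hm : PySem.Dict.get? m c with
      | some w =>
        simp only [hm, Option.some.injEq, Prod.mk.injEq] at h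
        obtain ⟨h1, h2, h3⟩ := h
        subst h1; subst h2; subst h3
        rw [hFeq]
        simp only [cptsRunE, if_neg hcs, hm]
        exact (cptsRun_mono g s fb F hfb).2 _ _ _ _ _ hP
      | none =>
        simp only [hm] at h
        by_cases hvc : PySem.Set.contains v c = true
        · simp only [if_pos hvc, Option.some.injEq, Prod.mk.injEq] at h
          obtain ⟨h1, h2, h3⟩ := h
          subst h1; subst h2; subst h3
          rw [hFeq]
          simp only [cptsRunE, if_neg hcs, hm, if_pos hvc]
          exact (cptsRun_mono g s fb F hfb).2 _ _ _ _ _ hP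
        · simp only [if_neg hvc] at h
          cases hgl : cptsGoList g s f (PySem.Dict.getD g c []) 0 m (PySem.Set.add v c) with
          | none => simp only [hgl] at h; simp at h
          | some w =>
            obtain ⟨tt, m₂, v₂⟩ := w
            simp only [hgl] at h
            cases hrem : PySem.Set.remove? v₂ c with
            | none => simp only [hrem] at h; simp at h
            | some v₃ =>
              simp only [hrem, Option.some.injEq, Prod.mk.injEq] at h
              obtain ⟨h1, h2, h3⟩ := h
              subst h1; subst h2; subst h3
              have hQr := hQ (PySem.Dict.getD g c []) 0 m (PySem.Set.add v c) tt m₂ v₂ hgl c v₃ hrem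
                stack 0 0 fb res (by norm_num) hP
              have hineq : 2 + (PySem.Dict.getD g c []).length * ((cptsMaxDeg g + 3) ^ f + 1)
                  ≤ (cptsMaxDeg g + 3) ^ (f + 1) := by
                have hpow : (cptsMaxDeg g + 3) ^ (f + 1)
                    = (cptsMaxDeg g + 3) ^ f * (cptsMaxDeg g + 3) := pow_succ _ _
                cases hns : PySem.Dict.get? g c with
                | none =>
                  have hgd : PySem.Dict.getD g c [] = [] := by rw [PySem.Dict.getD, hns]; rfl
                  rw [hgd]
                  have h3 : cptsMaxDeg g + 3 ≤ (cptsMaxDeg g + 3) ^ (f + 1) := Nat.le_self_pow (by omega) _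
                  simp only [List.length_nil, Nat.zero_mul]
                  omega
                | some ns =>
                  have hgd : PySem.Dict.getD g c [] = ns := by rw [PySem.Dict.getD, hns]; rfl
                  rw [hgd]
                  cases ns with
                  | nil =>
                    have h3 : cptsMaxDeg g + 3 ≤ (cptsMaxDeg g + 3) ^ (f + 1) := Nat.le_self_pow (by omega) _
                    simp only [List.length_nil, Nat.zero_mul]
                    omega
                  | cons n0 ns' =>
                    have hf0 : f ≠ 0 := by
                      intro h0
                      subst h0
                      rw [hgd] at hgl
                      simp [cptsGoList, cptsGo] at hgl
                    have hD : (n0 :: ns').length ≤ cptsMaxDeg g := cpts_len_le_maxDeg g c _ hns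
                    have hBf : cptsMaxDeg g + 3 ≤ (cptsMaxDeg g + 3) ^ f := Nat.le_self_pow hf0 _
                    have e1 : (n0 :: ns').length * ((cptsMaxDeg g + 3) ^ f + 1)
                        ≤ cptsMaxDeg g * ((cptsMaxDeg g + 3) ^ f + 1) :=
                      Nat.mul_le_mul_right _ hD
                    have e2 : cptsMaxDeg g * ((cptsMaxDeg g + 3) ^ f + 1)
                        = cptsMaxDeg g * (cptsMaxDeg g + 3) ^ f + cptsMaxDeg g := by ring
                    have e3 : (cptsMaxDeg g + 3) ^ f * (cptsMaxDeg g + 3)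
                        = cptsMaxDeg g * (cptsMaxDeg g + 3) ^ f + 3 * (cptsMaxDeg g + 3) ^ f := by ring
                    omega
              rw [hFeq]
              simp only [cptsRunE, if_neg hcs, hm, if_neg hvc]
              exact (cptsRun_mono g s _ F (by omega)).2 _ _ _ _ _ hQr

-- ===== VERDICT (by name: the statement is the Claim_ definition above) =====
theorem count_paths_to_start_spec : Claim_equal_count_paths_to_start := by
  unfold Claim_equal_count_paths_to_start
  intro graph current start memo visited _
  unfold Spec_count_paths_to_start count_paths_to_start count_paths_to_start_alt
  have hsome := cptsGo_isSome (PySem.Dict.mk graph) start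
    (cptsKeysLeft (PySem.Dict.mk graph) (visited.getD []) + 1) (visited.getD [])
    (by omega) (PySem.Dict.mk (memo.getD [])) current
  obtain ⟨⟨t, m', v'⟩, hgo⟩ := Option.isSome_iff_exists.mp hsome
  have hP : cptsRunP (PySem.Dict.mk graph) start 1 t [] m' v' = some t := by
    simp [cptsRunP]
  have hrun := cptsSim (PySem.Dict.mk graph) start _ _ _ _ _ _ _ hgo [] 1 t hP
  rw [Nat.add_comm 1 ((cptsMaxDeg (PySem.Dict.mk graph) + 3) ^
    (cptsKeysLeft (PySem.Dict.mk graph) (visited.getD []) + 1))] at hrun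
  simp only [hgo, hrun]
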